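-- pv_equiv track=rewrite | github.com/BlinkingStalker/G5119-Natural-Language-Engineering | Edited/Week6Labs/w6_selectedsolutions.py | find_sense_distributions
-- ===== SOURCE A (Python) =====
-- def find_sense_distributions(some_sentences):
--     allwords={}
--     for sentence in some_sentences:
--         for (word,sense) in sentence:
--             thisword=allwords.get(word,{})
--             thisword[sense]=thisword.get(sense,0)+1
--             allwords[word]=thisword
--     return allwords
-- ===== SOURCE B (Python) =====
-- def find_sense_distributions(some_sentences):
--     # Phase 1: group all senses by word, in first-occurrence order.
--     by_word = {}
--     for sentence in some_sentences:
--         for (word, sense) in sentence: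
--             by_word.setdefault(word, []).append(sense)
--     # Phase 2: count senses within each word's group.
--     out = {}
--     for word, senses in by_word.items():
--         counts = {}
--         for s in senses:
--             counts[s] = counts.get(s, 0) + 1
--         out[word] = counts
--     return out
-- ===== Notes on version B (the rewrite author's own statement) =====
-- stated objective: alternative
-- what changed: Instead of updating a nested word->sense->count dict on the fly, B first groups all senses by word into lists in one pass, then counts each word's sense list in a second regrouping pass.
import Mathlib
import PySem

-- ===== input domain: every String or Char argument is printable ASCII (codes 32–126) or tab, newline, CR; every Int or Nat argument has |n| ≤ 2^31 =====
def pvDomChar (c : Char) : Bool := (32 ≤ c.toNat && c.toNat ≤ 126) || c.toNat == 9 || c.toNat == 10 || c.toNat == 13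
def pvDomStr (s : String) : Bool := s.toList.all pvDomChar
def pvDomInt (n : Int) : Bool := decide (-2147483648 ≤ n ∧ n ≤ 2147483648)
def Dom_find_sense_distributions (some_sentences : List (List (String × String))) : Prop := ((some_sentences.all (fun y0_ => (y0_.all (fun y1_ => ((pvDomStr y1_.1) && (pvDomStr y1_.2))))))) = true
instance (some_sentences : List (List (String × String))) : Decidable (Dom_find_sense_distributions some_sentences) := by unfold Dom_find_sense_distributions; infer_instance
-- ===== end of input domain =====

-- B builds the same word→sense→count table as A but by a different decomposition:
-- one pass grouping senses into per-word lists, then a second pass counting each list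
-- (objective: alternative; equivalence of the RETURN value is proved for all inputs).

-- ===== PORT A =====
-- body of A's inner loop: thisword = allwords.get(word,{}); thisword[sense] = thisword.get(sense,0)+1; allwords[word] = thisword
def fsdStepA (allwords : PySem.Dict String (PySem.Dict String Int)) (ws : String × String) :
    PySem.Dict String (PySem.Dict String Int) :=
  let thisword := allwords.getD ws.1 PySem.Dict.empty
  let thisword := thisword.insert ws.2 (thisword.getD ws.2 0 + 1)
  allwords.insert ws.1 thisword

def find_sense_distributions (some_sentences : List (List (String × String))) :
    List (String × List (String × Int)) :=
  let allwords : PySem.Dict String (PySem.Dict String Int) :=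
    some_sentences.foldl (fun allwords sentence => sentence.foldl fsdStepA allwords) PySem.Dict.empty
  allwords.items.map (fun p => (p.1, p.2.items))

-- ===== PORT B =====
-- by_word.setdefault(word, []).append(sense)
def fsdGroupStep (by_word : PySem.Dict String (List String)) (ws : String × String) :
    PySem.Dict String (List String) :=
  by_word.modify ws.1 [] (· ++ [ws.2])

-- counts = {}; for s in senses: counts[s] = counts.get(s, 0) + 1
def fsdCount (senses : List String) : PySem.Dict String Int :=
  senses.foldl (fun c s => c.insert s (c.getD s 0 + 1)) PySem.Dict.empty

def find_sense_distributions_alt (some_sentences : List (List (String × String))) :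
    List (String × List (String × Int)) :=
  let by_word : PySem.Dict String (List String) :=
    some_sentences.foldl (fun bw sentence => sentence.foldl fsdGroupStep bw) PySem.Dict.empty
  let out : PySem.Dict String (PySem.Dict String Int) :=
    by_word.items.foldl (fun out p => out.insert p.1 (fsdCount p.2)) PySem.Dict.empty
  out.items.map (fun p => (p.1, p.2.items))

-- ===== PRECONDITION & SPEC =====
def Spec_find_sense_distributions (some_sentences : List (List (String × String))) (out : List (String × List (String × Int))) : Prop := out = find_sense_distributions_alt some_sentences
instance (some_sentences : List (List (String × String))) (out : List (String × List (String × Int))) : Decidable (Spec_find_sense_distributions some_sentences out) := by unfold Spec_find_sense_distributions; infer_instance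

-- ===== CLAIM (what is proved, stated in full; the proofs are below) =====
def Claim_equal_find_sense_distributions : Prop := ∀ (some_sentences : List (List (String × String))), Dom_find_sense_distributions some_sentences → Spec_find_sense_distributions some_sentences (find_sense_distributions some_sentences)

-- ===== LEMMAS AND PROOFS =====

-- A's table, read at one word, is exactly the sense-count loop run over that word's senses
theorem fsd_getD_foldA (ps : List (String × String)) (d : PySem.Dict String (PySem.Dict String Int))
    (k : String) :
    (ps.foldl fsdStepA d).getD k PySem.Dict.empty =
      ((ps.filter (fun p => p.1 == k)).map (·.2)).foldl
        (fun c s => c.insert s (c.getD s 0 + 1)) (d.getD k PySem.Dict.empty) := by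
  induction ps generalizing d with
  | nil => rfl
  | cons p rest ih =>
      by_cases h : p.1 = k
      · subst h
        simp [List.foldl_cons, ih, fsdStepA, PySem.Dict.getD_insert_self]
      · simp [List.foldl_cons, ih, fsdStepA, PySem.Dict.getD_insert, h, Ne.symm h]

theorem find_sense_distributions_eq_alt (ss : List (List (String × String))) :
    find_sense_distributions ss = find_sense_distributions_alt ss := by
  simp only [find_sense_distributions, find_sense_distributions_alt]
  rw [← List.foldl_flatten (f := fsdStepA), ← List.foldl_flatten (f := fsdGroupStep)]
  set ps := ss.flatten with hps
  -- the grouping dict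
  set g : PySem.Dict String (List String) := ps.foldl fsdGroupStep PySem.Dict.empty with hg
  set A : PySem.Dict String (PySem.Dict String Int) := ps.foldl fsdStepA PySem.Dict.empty with hA2
  -- keys agree
  have hkeysA : A.keys = PySem.Set.update (PySem.Dict.empty : PySem.Dict String (PySem.Dict String Int)).keys (ps.map (·.1)) := by
    rw [hA2]
    exact PySem.Dict.keys_foldl_insert_key ps (·.1)
      (fun d x => (d.getD x.1 PySem.Dict.empty).insert x.2 ((d.getD x.1 PySem.Dict.empty).getD x.2 0 + 1)) _
  have hkeysG : g.keys = PySem.Set.update (PySem.Dict.empty : PySem.Dict String (List String)).keys (ps.map (·.1)) := by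
    rw [hg]
    exact PySem.Dict.keys_foldl_modify_key ps (·.1) [] (fun d x => fun l => l ++ [x.2]) _
  have hkeys : A.keys = g.keys := by
    rw [hkeysA, hkeysG]; rfl
  have hndA : A.keys.Nodup := by
    rw [hA2]
    exact PySem.Dict.nodup_keys_foldl_insert_key ps (·.1) _ _ PySem.Dict.nodup_keys_empty
  have hndG : g.keys.Nodup := by rw [← hkeys]; exact hndA
  -- per-key values
  have hval : ∀ k, A.getD k PySem.Dict.empty = fsdCount (g.getD k []) := by
    intro k
    have h1 : g.getD k [] = (ps.filter (fun p => p.1 == k)).map (·.2) := by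
      rw [hg]
      have := PySem.Dict.getD_foldl_modify_append (l := ps) (d := (PySem.Dict.empty : PySem.Dict String (List String))) (c := k)
      simpa [fsdGroupStep] using this
    rw [h1, hA2, fsd_getD_foldA]
    rfl
  -- out's items
  have hout : ((g.items.foldl (fun out p => out.insert p.1 (fsdCount p.2)) PySem.Dict.empty).items)
      = g.items.map (fun p => (p.1, fsdCount p.2)) := by
    have := PySem.Dict.items_foldl_insert_fresh (l := g.items) (k := (·.1)) (v := fun p => fsdCount p.2)
      (d := (PySem.Dict.empty : PySem.Dict String (PySem.Dict String Int)))
      (by intro a _; exact PySem.Dict.contains_empty _)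
      (by simpa [PySem.Dict.keys] using hndG)
    simpa using this
  have hitemsA : A.items = A.keys.map (fun k => (k, A.getD k PySem.Dict.empty)) :=
    PySem.Dict.items_eq_map_keys A hndA PySem.Dict.empty
  have hitemsG : g.items = g.keys.map (fun k => (k, g.getD k [])) :=
    PySem.Dict.items_eq_map_keys g hndG []
  rw [hout, hitemsA, hitemsG, hkeys]
  simp [List.map_map, Function.comp, hval]

-- ===== VERDICT (by name: the statement is the Claim_ definition above) =====
theorem find_sense_distributions_spec : Claim_equal_find_sense_distributions := by
  intro ss _
  exact find_sense_distributions_eq_alt ss
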